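-- pv_equiv track=rewrite | github.com/mhalle/atomdoc | src/atomdoc/_id.py | increment_base64
-- ===== SOURCE A (Python) =====
-- BASE64_ALPHABET = "-0123456789ABCDEFGHIJKLMNOPQRSTUVWXYZ_abcdefghijklmnopqrstuvwxyz"
--
-- _ALPH_LEN = 64
--
-- _FIRST_CHAR = BASE64_ALPHABET[0]
--
-- _IDX: dict[str, int] = {ch: i for i, ch in enumerate(BASE64_ALPHABET)}
--
-- def increment_base64(s: str) -> str:
--     """Increment a base64 string by one."""
--     chars = list(s)
--     for i in range(len(chars) - 1, -1, -1):
--         idx = _IDX[chars[i]]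
--         if idx != _ALPH_LEN - 1:
--             chars[i] = BASE64_ALPHABET[idx + 1]
--             for j in range(i + 1, len(chars)):
--                 chars[j] = _FIRST_CHAR
--             return "".join(chars)
--     # All digits maxed — prepend next digit
--     return BASE64_ALPHABET[1] + _FIRST_CHAR * len(s)
-- ===== SOURCE B (Python) =====
-- BASE64_ALPHABET = "-0123456789ABCDEFGHIJKLMNOPQRSTUVWXYZ_abcdefghijklmnopqrstuvwxyz"
--
-- _IDX = {ch: i for i, ch in enumerate(BASE64_ALPHABET)}
--
--
-- def increment_base64(s: str) -> str:
--     """Increment a base64 string by one."""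
--     stripped = s.rstrip(BASE64_ALPHABET[-1])
--     if not stripped:
--         # every character (possibly zero of them) is maxed: carry out
--         return BASE64_ALPHABET[1] + BASE64_ALPHABET[0] * len(s)
--     bumped = BASE64_ALPHABET[_IDX[stripped[-1]] + 1]
--     return stripped[:-1] + bumped + BASE64_ALPHABET[0] * (len(s) - len(stripped))
-- ===== Notes on version B (the rewrite author's own statement) =====
-- stated objective: simpler
-- what changed: B replaces A's backward index loop with an inner suffix-reset loop by a single rstrip of the maximal character plus a sliced rebuild (stripped[:-1] + bumped char + '-' padding).
import Mathlib
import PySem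

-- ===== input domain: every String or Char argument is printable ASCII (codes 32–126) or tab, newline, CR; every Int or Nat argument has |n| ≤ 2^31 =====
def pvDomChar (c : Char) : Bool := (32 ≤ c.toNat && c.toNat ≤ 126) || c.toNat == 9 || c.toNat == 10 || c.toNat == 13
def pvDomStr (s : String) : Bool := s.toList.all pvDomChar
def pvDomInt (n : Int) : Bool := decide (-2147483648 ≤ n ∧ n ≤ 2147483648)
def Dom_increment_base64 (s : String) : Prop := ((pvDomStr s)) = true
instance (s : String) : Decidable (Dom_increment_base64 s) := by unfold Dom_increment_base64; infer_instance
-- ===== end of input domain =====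

-- B replaces A's backward index loop + inner reset loop by one rstrip of the max
-- character and a sliced rebuild (objective: simpler; same return value).

-- ===== PORT A =====
-- BASE64_ALPHABET as a list of chars
def pvB64 : List Char := "-0123456789ABCDEFGHIJKLMNOPQRSTUVWXYZ_abcdefghijklmnopqrstuvwxyz".toList

-- _IDX[c]: first index of c in the alphabet (the dict built by enumerate); none = KeyError
def pvIdx? (c : Char) : Option Nat := PySem.List.index? pvB64 c

-- A's 'for i in range(len(chars)-1, -1, -1)' loop; fuel = i+1, inspects chars[i].
-- The inner 'for j' loop overwrites the whole suffix with '-', i.e. a replicate.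
def pvLoopA (chars : List Char) : Nat → List Char
  | 0 => '0' :: List.replicate chars.length '-'        -- all digits maxed: '0' + '-'*len(s)
  | i + 1 =>
    match chars[i]? with
    | none => []                                        -- unreachable (i < len)
    | some c =>
      match pvIdx? c with
      | none => []                                      -- Python raises KeyError; excluded by Pre_
      | some idx =>
        if idx ≠ 63 then
          chars.take i ++ pvB64.getD (idx + 1) ' ' :: List.replicate (chars.length - (i + 1)) '-'
        else
          pvLoopA chars i

def increment_base64 (s : String) : String := String.mk (pvLoopA s.toList s.toList.length)

-- ===== PORT B =====
-- s.rstrip('z') ported by hand (exact for a 1-char strip set): drop the trailing run of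
-- 'z' = reverse-side dropWhile; then stripped[-1] is the head of that reversed remainder.
def increment_base64_alt (s : String) : String :=
  match s.toList.reverse.dropWhile (· == 'z') with
  | [] => String.mk ('0' :: List.replicate s.toList.length '-')   -- everything maxed (incl. "")
  | c :: rest =>
    match pvIdx? c with
    | none => ""                                        -- Python raises KeyError; excluded by Pre_
    | some idx =>
      String.mk (rest.reverse ++ pvB64.getD (idx + 1) ' ' ::
        List.replicate (s.toList.length - (rest.length + 1)) '-')

-- ===== PRECONDITION & SPEC =====
-- Pre_ excludes exactly the inputs on which A raises KeyError (the rightmost character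
-- that is not the maximal 'z' is outside the alphabet); B raises KeyError there too.
def Pre_increment_base64 (s : String) : Prop :=
  ((s.toList.reverse.dropWhile (· == 'z')).head?.all (fun c => pvB64.contains c)) = true
instance (s : String) : Decidable (Pre_increment_base64 s) := by
  unfold Pre_increment_base64; infer_instance

def pvWitness_increment_base64 : String := "a0z"

def Spec_increment_base64 (s : String) (out : String) : Prop := out = increment_base64_alt s
instance (s : String) (out : String) : Decidable (Spec_increment_base64 s out) := by
  unfold Spec_increment_base64; infer_instance

-- ===== CLAIM (what is proved, stated in full; the proofs are below) =====
def Claim_equal_increment_base64 : Prop :=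
  ∀ (s : String), Dom_increment_base64 s → Pre_increment_base64 s →
    Spec_increment_base64 s (increment_base64 s)

-- ===== LEMMAS AND PROOFS =====

-- an index?-hit at slot 63 can only be 'z' (slot 63 of the alphabet)
lemma pvIdx?_eq_63 (c : Char) (h : pvIdx? c = some 63) : c = 'z' := by
  unfold pvIdx? at h
  rw [PySem.List.index?_eq_some_iff] at h
  obtain ⟨pre, suf, hx, hlen, -⟩ := h
  have h63 : pvB64[63]? = some c := by
    rw [hx, List.getElem?_append_right (by omega)]
    simp [hlen]
  have hz : pvB64[63]? = some 'z' := by decide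
  rw [hz] at h63
  exact (Option.some_inj.mp h63).symm

-- if dropWhile produces c :: rest then c fails the predicate
lemma pvDropWhile_cons_pred {p : Char → Bool} {l : List Char} {c : Char} {rest : List Char}
    (h : l.dropWhile p = c :: rest) : p c = false := by
  induction l with
  | nil => simp at h
  | cons a t ih =>
    rw [List.dropWhile_cons] at h
    by_cases hp : p a = true
    · rw [if_pos hp] at h; exact ih h
    · rw [if_neg hp] at h
      cases h
      simpa using hp

-- the loop skips over the trailing run of 'z's: fuel drops from l.length + j to l.length
lemma pvLoopA_z (l : List Char) (k j : Nat) (hj : j ≤ k) :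
    pvLoopA (l ++ List.replicate k 'z') (l.length + j) =
    pvLoopA (l ++ List.replicate k 'z') l.length := by
  induction j with
  | zero => rfl
  | succ j ih =>
    have hget : (l ++ List.replicate k 'z')[l.length + j]? = some 'z' := by
      rw [List.getElem?_append_right (by omega)]
      have h1 : l.length + j - l.length = j := by omega
      rw [h1, List.getElem?_replicate, if_pos (by omega)]
    have hz : pvIdx? 'z' = some 63 := by decide
    rw [show l.length + (j + 1) = (l.length + j) + 1 from rfl]
    rw [pvLoopA, hget]
    simp only [hz, ne_eq, not_true_eq_false, ite_false]
    exact ih (by omega)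

-- the all-maxed case: the loop runs out and returns '0' + '-'*len
lemma pvLoopA_all_z (k : Nat) :
    pvLoopA (List.replicate k 'z') k = '0' :: List.replicate k '-' := by
  have h := pvLoopA_z [] k k le_rfl
  simp only [List.nil_append, List.length_nil, Nat.zero_add] at h
  rw [h, pvLoopA, List.length_replicate]

-- the generic step: rightmost non-max character c (with index idx ≠ 63) gets bumped,
-- the k trailing 'z's reset to '-'
lemma pvLoopA_step (r : List Char) (c : Char) (k idx : Nat)
    (hidx : pvIdx? c = some idx) (h63 : idx ≠ 63) :
    pvLoopA (r.reverse ++ c :: List.replicate k 'z') (r.length + 1 + k) =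
    r.reverse ++ pvB64.getD (idx + 1) ' ' :: List.replicate k '-' := by
  have hassoc : r.reverse ++ c :: List.replicate k 'z'
      = (r.reverse ++ [c]) ++ List.replicate k 'z' := by simp
  have hfuel := pvLoopA_z (r.reverse ++ [c]) k k le_rfl
  simp only [List.length_append, List.length_reverse, List.length_cons,
    List.length_nil] at hfuel
  rw [hassoc, show r.length + 1 + k = (r.length + 1) + k from rfl, hfuel]
  have hget : ((r.reverse ++ [c]) ++ List.replicate k 'z')[r.length]? = some c := by
    rw [List.getElem?_append_left (by simp), List.getElem?_append_right (by simp)]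
    simp
  rw [pvLoopA, hget]
  simp only [hidx, ne_eq, h63, not_false_eq_true, if_pos]
  have htake : ((r.reverse ++ [c]) ++ List.replicate k 'z').take r.length = r.reverse := by
    rw [List.append_assoc, List.take_append_of_le_length (by simp), List.take_of_length_le (by simp)]
  have hlen : ((r.reverse ++ [c]) ++ List.replicate k 'z').length - (r.length + 1) = k := by
    simp; omega
  rw [htake, hlen]

-- the takeWhile of (· == 'z') is a replicate of 'z'
lemma pvTakeWhile_z_replicate (xs : List Char) :
    xs.takeWhile (· == 'z') = List.replicate (xs.takeWhile (· == 'z')).length 'z' := by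
  apply List.eq_replicate_of_mem
  intro b hb
  have := List.mem_takeWhile_imp hb
  simpa using this

theorem increment_base64_spec : Claim_equal_increment_base64 := by
  intro s _ hpre
  unfold Spec_increment_base64 increment_base64 increment_base64_alt
  obtain ⟨k, hrep⟩ : ∃ k, s.toList.reverse.takeWhile (· == 'z') = List.replicate k 'z' :=
    ⟨_, pvTakeWhile_z_replicate _⟩
  have hdecomp : s.toList
      = (s.toList.reverse.dropWhile (· == 'z')).reverse ++ List.replicate k 'z' := by
    conv_lhs => rw [← List.reverse_reverse s.toList,
      ← List.takeWhile_append_dropWhile (p := (· == 'z')) (l := s.toList.reverse)]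
    rw [List.reverse_append, hrep, List.reverse_replicate]
  cases hrest : s.toList.reverse.dropWhile (· == 'z') with
  | nil =>
    rw [hrest] at hdecomp
    simp only [List.reverse_nil, List.nil_append] at hdecomp
    simp only [hdecomp, List.length_replicate, pvLoopA_all_z]
  | cons c rest =>
    have hc_ne : (c == 'z') = false := pvDropWhile_cons_pred (p := fun x => x == 'z') hrest
    have hc_mem : c ∈ pvB64 := by
      unfold Pre_increment_base64 at hpre
      rw [hrest] at hpre
      simpa using hpre
    obtain ⟨idx, hidx⟩ : ∃ idx, pvIdx? c = some idx :=
      Option.isSome_iff_exists.mp (by rw [pvIdx?, PySem.List.index?_isSome_iff]; exact hc_mem)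
    have hidx63 : idx ≠ 63 := by
      intro h; subst h
      rw [pvIdx?_eq_63 c hidx] at hc_ne
      simp at hc_ne
    rw [hrest] at hdecomp
    have hform : s.toList = rest.reverse ++ c :: List.replicate k 'z' := by
      rw [hdecomp]; simp
    simp only [hidx, hform]
    have hL : (rest.reverse ++ c :: List.replicate k 'z').length = rest.length + 1 + k := by
      simp; omega
    rw [hL, pvLoopA_step rest c k idx hidx hidx63,
      show rest.length + 1 + k - (rest.length + 1) = k from by omega]

-- ===== VERDICT (by name: the statement is the Claim_ definition above) =====
-- (increment_base64_spec is proved directly above)
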